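-- pv_equiv track=rewrite | github.com/CocoRoF/Contextifier | libs/core/processor/pdf_legacy/pdf_handler_default.py | _clean_table_data
-- ===== SOURCE A (Python) =====
-- from typing import Any, Dict, List, Optional, Tuple, Set
--
-- def _clean_table_data(data: List[List[Optional[str]]]) -> List[List[str]]:
--     """테이블 데이터를 정제합니다."""
--     if not data:
--         return []
--
--     max_cols = max(len(row) for row in data if row) if data else 0
--     cleaned = []
--
--     for row in data:
--         cleaned_row = []
--         for i in range(max_cols):
--             if row and i < len(row):
--                 cell = row[i]
--                 if cell is None:
--                     cleaned_row.append("")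
--                 else:
--                     cleaned_row.append(str(cell).replace('\n', ' ').strip())
--             else:
--                 cleaned_row.append("")
--         cleaned.append(cleaned_row)
--
--     return cleaned
-- ===== SOURCE B (Python) =====
-- from typing import List, Optional
--
--
-- def _clean_cell(cell: Optional[str]) -> str:
--     return "" if cell is None else str(cell).replace('\n', ' ').strip()
--
--
-- def _clean_table_data(data: List[List[Optional[str]]]) -> List[List[str]]:
--     if not data:
--         return []
--     max_cols = max((len(r) for r in data if r), default=0)
--     # build the table column by column, then transpose back to rows
--     cols = [
--         [_clean_cell(r[i]) if i < len(r) else "" for r in data]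
--         for i in range(max_cols)
--     ]
--     if not cols:
--         return [[] for _ in data]
--     return [list(t) for t in zip(*cols)]
-- ===== Notes on version B (the rewrite author's own statement) =====
-- stated objective: alternative
-- what changed: B builds the cleaned table column-major (one cleaned column per column index, with a clean_cell helper) and then transposes back to rows with zip(*cols), instead of A's row-major nested index loop.
-- crash fix: On non-empty data whose rows are all empty lists, A raises ValueError (max() of an empty sequence); B returns one empty row per input row. — e.g. on _clean_table_data([[], []]): A raises ValueError, B returns [[], []]
import Mathlib
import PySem

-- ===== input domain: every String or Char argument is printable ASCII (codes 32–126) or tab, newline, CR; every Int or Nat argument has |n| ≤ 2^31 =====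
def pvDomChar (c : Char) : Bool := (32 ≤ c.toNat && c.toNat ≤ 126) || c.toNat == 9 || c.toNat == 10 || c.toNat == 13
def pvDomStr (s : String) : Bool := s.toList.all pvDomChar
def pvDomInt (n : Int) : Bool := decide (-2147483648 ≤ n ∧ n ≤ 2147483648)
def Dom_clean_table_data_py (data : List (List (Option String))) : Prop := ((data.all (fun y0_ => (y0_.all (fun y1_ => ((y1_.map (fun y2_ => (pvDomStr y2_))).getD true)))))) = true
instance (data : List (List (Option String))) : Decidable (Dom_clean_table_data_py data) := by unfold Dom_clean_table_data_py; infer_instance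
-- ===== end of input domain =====

-- B builds the cleaned table column-major (one cleaned column per column index) and transposes back
-- to rows with a zip(*cols) port, instead of A's row-major nested index loop; same values, no speed claim.

-- ===== PORT A =====
-- lengths of the non-empty rows: the generator 'len(row) for row in data if row' shared by both Pythons
def pvLens (data : List (List (Option String))) : List Nat :=
  (data.filter (fun r => !r.isEmpty)).map List.length

def clean_table_data_py (data : List (List (Option String))) : List (List String) :=
  if data.isEmpty then []
  else
    match pvLens data with
    | [] => []   -- Python's max() raises ValueError here; excluded by Pre_clean_table_data_py
    | x :: xs =>
      data.map (fun row =>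
        (List.range (xs.foldl max x)).map (fun i =>
          if !row.isEmpty && i < row.length then
            match row[i]? with
            | some (some c) => PySem.Str.strip (PySem.Str.replace c "\n" " ")
            | some none => ""
            | none => ""
          else ""))

-- ===== PORT B =====
def pvCleanCell (cell : Option String) : String :=
  match cell with
  | none => ""
  | some s => PySem.Str.strip (PySem.Str.replace s "\n" " ")

-- port of Python's zip(*cols): emit the tuple of heads while every column is non-empty
def pvZipStar (cols : List (List String)) : List (List String) :=
  if h : !cols.isEmpty && cols.all (fun c => !c.isEmpty) then
    cols.map (fun c => c.headD "") :: pvZipStar (cols.map List.tail)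
  else []
termination_by (cols.headD []).length
decreasing_by
  simp only [Bool.and_eq_true, Bool.not_eq_true', List.isEmpty_eq_false_iff,
    List.all_eq_true] at h
  obtain ⟨hne, hall⟩ := h
  cases cols with
  | nil => exact absurd rfl hne
  | cons c cs =>
    have hc : c ≠ [] := by simpa using hall c (List.mem_cons_self)
    cases c with
    | nil => exact absurd rfl hc
    | cons a l => simp

def clean_table_data_py_alt (data : List (List (Option String))) : List (List String) :=
  if data.isEmpty then []
  else
    let maxCols := (pvLens data).foldl max 0
    let cols := (List.range maxCols).map (fun i =>
      data.map (fun r => if i < r.length then pvCleanCell (r.getD i none) else ""))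
    if cols.isEmpty then data.map (fun _ => []) else pvZipStar cols

-- ===== PRECONDITION & SPEC =====
-- Pre_ excludes exactly the inputs where A raises: non-empty data whose rows are all empty
-- (max() of an empty sequence raises ValueError).
def Pre_clean_table_data_py (data : List (List (Option String))) : Prop :=
  data = [] ∨ ∃ r ∈ data, r ≠ []
instance (data : List (List (Option String))) : Decidable (Pre_clean_table_data_py data) := by
  unfold Pre_clean_table_data_py; infer_instance

def pvWitness_clean_table_data_py : List (List (Option String)) := [[some "a", none], [none]]

-- On non-empty data whose rows are all empty lists, A raises ValueError (max() of an empty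
-- sequence); B returns one empty row per input row.
def Raises_clean_table_data_py (data : List (List (Option String))) : Prop :=
  data ≠ [] ∧ ∀ r ∈ data, r = []
instance (data : List (List (Option String))) : Decidable (Raises_clean_table_data_py data) := by
  unfold Raises_clean_table_data_py; infer_instance

def pvRaiseWitness_clean_table_data_py : List (List (Option String)) := [[], []]
def pvRaiseWitnessOut_clean_table_data_py : List (List String) := [[], []]

def Spec_clean_table_data_py (data : List (List (Option String))) (out : List (List String)) : Prop := out = clean_table_data_py_alt data
instance (data : List (List (Option String))) (out : List (List String)) : Decidable (Spec_clean_table_data_py data out) := by unfold Spec_clean_table_data_py; infer_instance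

-- ===== CLAIM (what is proved, stated in full; the proofs are below) =====
def Claim_equal_clean_table_data_py : Prop := ∀ (data : List (List (Option String))), Dom_clean_table_data_py data → Pre_clean_table_data_py data → Spec_clean_table_data_py data (clean_table_data_py data)

def Claim_raises_clean_table_data_py : Prop :=
  (∀ (data : List (List (Option String))), Dom_clean_table_data_py data → Raises_clean_table_data_py data → ¬ Pre_clean_table_data_py data) ∧
  (Dom_clean_table_data_py (pvRaiseWitness_clean_table_data_py) ∧ Raises_clean_table_data_py (pvRaiseWitness_clean_table_data_py) ∧ clean_table_data_py_alt (pvRaiseWitness_clean_table_data_py) = pvRaiseWitnessOut_clean_table_data_py)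

-- ===== LEMMAS AND PROOFS =====

theorem pv_le_foldl_max (l : List Nat) (b a : Nat) (h : a ∈ l ∨ a ≤ b) : a ≤ l.foldl max b := by
  induction l generalizing b with
  | nil => simpa using h
  | cons x xs ih =>
    apply ih
    rcases h with h | h
    · rcases List.mem_cons.mp h with rfl | h
      · right; exact Nat.le_max_right b a
      · left; exact h
    · right; exact h.trans (Nat.le_max_left b x)

theorem pv_foldl_max_zero (x : Nat) (xs : List Nat) :
    (x :: xs).foldl max 0 = xs.foldl max x := by
  simp [List.foldl]

theorem pv_mem_lens {data : List (List (Option String))} {r : List (Option String)}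
    (hr : r ∈ data) (hne : r ≠ []) : r.length ∈ pvLens data := by
  unfold pvLens
  exact List.mem_map_of_mem (List.mem_filter.mpr ⟨hr, by simp [hne]⟩)

-- pvZipStar of a rectangular matrix (every column of length n, at least one column)
-- is the index-wise transpose.
theorem pv_zipStar_rect (n : Nat) (cols : List (List String)) (hne : cols ≠ [])
    (hlen : ∀ c ∈ cols, c.length = n) :
    pvZipStar cols = (List.range n).map (fun j => cols.map (fun c => c.getD j "")) := by
  induction n generalizing cols with
  | zero =>
    rw [pvZipStar]
    have : ¬ ((!cols.isEmpty && cols.all fun c => !c.isEmpty) = true) := by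
      simp only [Bool.and_eq_true, Bool.not_eq_true', List.isEmpty_eq_false_iff,
        List.all_eq_true, not_and]
      intro _ h
      cases cols with
      | nil => exact hne rfl
      | cons c cs =>
        exact (h c List.mem_cons_self) (List.length_eq_zero_iff.mp (hlen c List.mem_cons_self))
    simp [this]
  | succ n ih =>
    rw [pvZipStar]
    have hcond : (!cols.isEmpty && cols.all fun c => !c.isEmpty) = true := by
      simp only [Bool.and_eq_true, Bool.not_eq_true', List.isEmpty_eq_false_iff,
        List.all_eq_true]
      refine ⟨hne, fun c hc => ?_⟩
      have := hlen c hc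
      intro hnil
      subst hnil
      simp at this
    rw [dif_pos hcond]
    have htne : cols.map List.tail ≠ [] := by simpa using hne
    have htlen : ∀ c ∈ cols.map List.tail, c.length = n := by
      intro c hc
      obtain ⟨d, hd, rfl⟩ := List.mem_map.mp hc
      have hdl := hlen d hd
      rw [List.length_tail, hdl]
      omega
    rw [ih (cols.map List.tail) htne htlen]
    rw [List.range_succ_eq_map]
    simp only [List.map_cons, List.map_map]
    congr 1
    · apply List.map_congr_left
      intro c _
      cases c <;> simp
    · apply List.map_congr_left
      intro j _
      simp only [Function.comp]
      apply List.map_congr_left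
      intro c _
      cases c <;> simp

-- per-cell agreement between A's guarded index access and B's column cell
theorem pv_cell_eq (row : List (Option String)) (i : Nat) :
    (if !row.isEmpty && i < row.length then
      match row[i]? with
      | some (some c) => PySem.Str.strip (PySem.Str.replace c "\n" " ")
      | some none => ""
      | none => ""
    else "")
    = (if i < row.length then pvCleanCell (row.getD i none) else "") := by
  by_cases hi : i < row.length
  · have hne : row.isEmpty = false := by
      cases row with
      | nil => simp at hi
      | cons a l => simp
    simp only [hne, Bool.not_false, Bool.true_and, hi, decide_true, if_pos]
    rw [List.getD_eq_getElem?_getD, List.getElem?_eq_getElem hi]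
    cases row[i] with
    | none => simp [pvCleanCell]
    | some c => simp [pvCleanCell]
  · have : ¬ (!row.isEmpty && decide (i < row.length)) = true := by simp [hi]
    rw [if_neg this, if_neg hi]

-- ===== VERDICT (by name: the statement is the Claim_ definition above) =====
theorem clean_table_data_py_spec : Claim_equal_clean_table_data_py := by
  intro data _dom pre
  unfold Spec_clean_table_data_py clean_table_data_py clean_table_data_py_alt
  by_cases hd : data.isEmpty
  · simp [hd]
  · rcases pre with rfl | ⟨r, hr, hrne⟩
    · simp at hd
    · have hmem : r.length ∈ pvLens data := pv_mem_lens hr hrne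
      cases hl : pvLens data with
      | nil => rw [hl] at hmem; simp at hmem
      | cons x xs =>
        simp only [hd, if_neg, Bool.false_eq_true, not_false_eq_true]
        rw [pv_foldl_max_zero]
        set m := xs.foldl max x with hm
        have hmpos : 0 < m := by
          rw [hl] at hmem
          have h1 : r.length ≤ m := by
            rw [hm]
            rcases List.mem_cons.mp hmem with h | h
            · rw [h]; exact pv_le_foldl_max xs x x (Or.inr le_rfl)
            · exact pv_le_foldl_max xs x _ (Or.inl h)
          have : 0 < r.length := by
            cases r with
            | nil => exact absurd rfl hrne
            | cons a l => simp
          omega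
        set cols := (List.range m).map (fun i =>
          data.map (fun r => if i < r.length then pvCleanCell (r.getD i none) else "")) with hcols
        have hcne : ¬ cols.isEmpty = true := by
          simp [hcols, List.isEmpty_iff, List.range_eq_nil]
          omega
        rw [if_neg hcne]
        have hrect : ∀ c ∈ cols, c.length = data.length := by
          intro c hc
          obtain ⟨i, _, rfl⟩ := List.mem_map.mp hc
          simp
        rw [pv_zipStar_rect data.length cols (by simpa [List.isEmpty_iff] using hcne) hrect]
        apply List.ext_getElem
        · simp
        · intro j h1 h2
          simp only [List.getElem_map, List.getElem_range, hcols, List.map_map]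
          have hj : j < data.length := by simpa using h2
          apply List.map_congr_left
          intro i _
          simp only [Function.comp]
          rw [List.getD_eq_getElem?_getD, List.getElem?_map, List.getElem?_eq_getElem hj]
          simp only [Option.map_some, Option.getD_some]
          exact pv_cell_eq data[j] i

@[simp] theorem clean_table_data_py_raises : Claim_raises_clean_table_data_py := by
  unfold Claim_raises_clean_table_data_py
  constructor
  · intro data _dom ⟨hne, hall⟩ pre
    rcases pre with rfl | ⟨r, hr, hrne⟩
    · exact hne rfl
    · exact hrne (hall r hr)
  · refine ⟨by decide, by decide, ?_⟩
    rw [clean_table_data_py_alt]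
    decide
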